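-- pv_equiv track=rewrite | github.com/uniqueumesh/AI-Backlinker | backend/scraping/link_extraction.py | _classify_support_links
-- ===== SOURCE A (Python) =====
-- def _classify_support_links(links: list[str]) -> tuple[str, str]:
--     """Classify links as guidelines or contact forms."""
--     guidelines_url = ""
--     contact_url = ""
--
--     for link in links:
--         lower_link = link.lower()
--         if any(term in lower_link for term in ['write-for-us', 'guest-post', 'contribute', 'guidelines', 'submit']):
--             if not guidelines_url:
--                 guidelines_url = link
--         elif any(term in lower_link for term in ['contact', 'about', 'write-to-us']):
--             if not contact_url:
--                 contact_url = link
--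
--     return guidelines_url, contact_url
-- ===== SOURCE B (Python) =====
-- GUIDE_TERMS = ['write-for-us', 'guest-post', 'contribute', 'guidelines', 'submit']
-- CONTACT_TERMS = ['contact', 'about', 'write-to-us']
--
--
-- def _is_guide(link: str) -> bool:
--     return any(t in link.lower() for t in GUIDE_TERMS)
--
--
-- def _is_contact_only(link: str) -> bool:
--     return not _is_guide(link) and any(t in link.lower() for t in CONTACT_TERMS)
--
--
-- def _classify_support_links(links: list[str]) -> tuple[str, str]:
--     """Classify links as guidelines or contact forms (two independent first-match scans)."""
--     guidelines_url = next((l for l in links if _is_guide(l)), "")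
--     contact_url = next((l for l in links if _is_contact_only(l)), "")
--     return guidelines_url, contact_url
-- ===== Notes on version B (the rewrite author's own statement) =====
-- stated objective: idiomatic
-- what changed: Replaces the single fused loop carrying two mutable slots with two independent first-match searches (next over a generator), keeping the guideline-exclusion guard in the contact scan.
import Mathlib
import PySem

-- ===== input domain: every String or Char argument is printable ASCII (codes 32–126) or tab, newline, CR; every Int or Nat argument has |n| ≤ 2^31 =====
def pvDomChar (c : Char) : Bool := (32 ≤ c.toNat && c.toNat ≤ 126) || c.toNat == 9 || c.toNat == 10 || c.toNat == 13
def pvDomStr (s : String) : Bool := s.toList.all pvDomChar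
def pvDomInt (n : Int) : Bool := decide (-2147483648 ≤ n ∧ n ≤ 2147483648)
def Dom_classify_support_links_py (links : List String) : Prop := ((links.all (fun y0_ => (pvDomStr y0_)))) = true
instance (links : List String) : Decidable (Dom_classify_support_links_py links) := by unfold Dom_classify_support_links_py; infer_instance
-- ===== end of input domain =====

-- B replaces A's single fused loop (two mutable slots) with two independent
-- first-match searches, guarding the contact scan with "not a guideline link" (idiomatic).


-- ===== PORT A =====
-- one fold over links carrying the mutable pair (guidelines_url, contact_url)
def classify_support_links_py (links : List String) : String × String :=
  links.foldl (fun (st : String × String) link =>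
    let lower_link := PySem.Str.lower link
    if ["write-for-us", "guest-post", "contribute", "guidelines", "submit"].any
        (fun term => PySem.Str.isIn term lower_link) then
      if st.1 = "" then (link, st.2) else st
    else if ["contact", "about", "write-to-us"].any
        (fun term => PySem.Str.isIn term lower_link) then
      if st.2 = "" then (st.1, link) else st
    else st) ("", "")

-- ===== PORT B =====
def pvIsGuide (link : String) : Bool :=
  ["write-for-us", "guest-post", "contribute", "guidelines", "submit"].any
    (fun t => PySem.Str.isIn t (PySem.Str.lower link))

def pvIsContactOnly (link : String) : Bool :=
  !pvIsGuide link &&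
    ["contact", "about", "write-to-us"].any
      (fun t => PySem.Str.isIn t (PySem.Str.lower link))

def classify_support_links_py_alt (links : List String) : String × String :=
  ((links.find? pvIsGuide).getD "", (links.find? pvIsContactOnly).getD "")

-- ===== PRECONDITION & SPEC =====
def Spec_classify_support_links_py (links : List String) (out : String × String) : Prop := out = classify_support_links_py_alt links
instance (links : List String) (out : String × String) : Decidable (Spec_classify_support_links_py links out) := by unfold Spec_classify_support_links_py; infer_instance

-- ===== CLAIM (what is proved, stated in full; the proofs are below) =====
def Claim_equal_classify_support_links_py : Prop := ∀ (links : List String), Dom_classify_support_links_py links → Spec_classify_support_links_py links (classify_support_links_py links)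

-- ===== LEMMAS AND PROOFS =====

-- the contact-term test of A's elif (and of pvIsContactOnly's right conjunct)
def pvContact (link : String) : Bool :=
  ["contact", "about", "write-to-us"].any
    (fun t => PySem.Str.isIn t (PySem.Str.lower link))

-- a link matching a (nonempty) term is not the empty string
theorem pvIsGuide_ne_empty {l : String} (h : pvIsGuide l = true) : l ≠ "" := by
  intro he; subst he; exact absurd h (by decide)

theorem pvContact_ne_empty {l : String} (h : pvContact l = true) : l ≠ "" := by
  intro he; subst he; exact absurd h (by decide)

-- loop invariant: A's fold from any state (g, c) fills only the still-empty slots,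
-- with exactly B's two first-match searches
theorem pv_fold_eq (links : List String) : ∀ (g c : String),
    links.foldl (fun (st : String × String) link =>
      if pvIsGuide link then
        if st.1 = "" then (link, st.2) else st
      else if pvContact link then
        if st.2 = "" then (st.1, link) else st
      else st) (g, c)
    = ((if g = "" then (links.find? pvIsGuide).getD "" else g),
       (if c = "" then (links.find? pvIsContactOnly).getD "" else c)) := by
  induction links with
  | nil => intro g c; simp
  | cons l ls ih =>
    intro g c
    simp only [List.foldl_cons, List.find?_cons]
    cases hg : pvIsGuide l with
    | true =>
      have hl : l ≠ "" := pvIsGuide_ne_empty hg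
      have hco : pvIsContactOnly l = false := by simp [pvIsContactOnly, hg]
      by_cases hge : g = "" <;> simp [hco, hge, ih, hl]
    | false =>
      have hco : pvIsContactOnly l = (pvContact l) := by
        simp [pvIsContactOnly, pvContact, hg]
      cases hc : pvContact l with
      | true =>
        have hl : l ≠ "" := pvContact_ne_empty hc
        by_cases hce : c = "" <;> simp [hco, hc, hce, ih, hl]
      | false => simp [hco, hc, ih]

-- ===== VERDICT (by name: the statement is the Claim_ definition above) =====
theorem classify_support_links_py_spec : Claim_equal_classify_support_links_py := by
  intro links _
  show classify_support_links_py links = classify_support_links_py_alt links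
  simpa using pv_fold_eq links "" ""
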